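-- pv_equiv track=rewrite | github.com/rrennoir/Projet-Mining-Wars | implem.py | check_border
-- ===== SOURCE A (Python) =====
-- def check_border(type_axis, vessel_position, board, direction):
--     """
--     Check if the vessel stay in the board.
--
--     Parameters:
--     -----------
--     type: line or column to check (str)
--     vessel_position: contains the position of each entire vessel into a list (list)
--     board: size of the game board (list)
--     direction: move to check (int)
--
--     Return:
--     -------
--     result: False if the vessel go outside , true otherwise
--
--     Version:
--     --------
--     Spec: Ryan Rennoir V.1 (30/03/2018)
--     Impl: Ryan Rennoir V.1 (04/04/2018)
--     """
--
--     if type_axis == 'line':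
--         for position in vessel_position:
--             if position[0] + direction > board[0] or position[0] + direction < 1:
--                 return False
--     else:
--         for position in vessel_position:
--             if position[1] + direction > board[1] or position[1] + direction < 1:
--                 return False
--
--     return True
-- ===== SOURCE B (Python) =====
-- def check_border(type_axis, vessel_position, board, direction):
--     idx = 0 if type_axis == 'line' else 1
--     coords = [p[idx] for p in vessel_position]
--     return (not coords) or (min(coords) + direction >= 1
--                             and max(coords) + direction <= board[idx])
-- ===== Notes on version B (the rewrite author's own statement) =====
-- stated objective: alternative
-- what changed: Replaces the per-position early-exit scan over the tuple components with a single coordinate extraction followed by a min/max aggregate reduction, checking only the two extreme coordinates against the bounds.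
import Mathlib
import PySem

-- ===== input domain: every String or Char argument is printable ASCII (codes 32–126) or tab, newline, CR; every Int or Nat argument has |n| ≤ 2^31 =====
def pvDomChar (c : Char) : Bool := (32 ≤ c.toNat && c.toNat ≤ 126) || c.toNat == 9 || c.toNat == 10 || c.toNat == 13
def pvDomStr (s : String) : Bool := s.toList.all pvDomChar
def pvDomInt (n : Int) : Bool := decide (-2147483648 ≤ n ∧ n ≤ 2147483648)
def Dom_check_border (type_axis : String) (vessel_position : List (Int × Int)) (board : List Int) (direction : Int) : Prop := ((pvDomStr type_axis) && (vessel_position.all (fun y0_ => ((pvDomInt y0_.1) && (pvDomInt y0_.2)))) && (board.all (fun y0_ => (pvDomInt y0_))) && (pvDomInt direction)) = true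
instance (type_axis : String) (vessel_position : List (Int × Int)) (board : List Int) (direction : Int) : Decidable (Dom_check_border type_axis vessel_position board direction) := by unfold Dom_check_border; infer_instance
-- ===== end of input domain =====

-- B replaces A's per-position early-exit scan with a coordinate extraction plus a min/max
-- aggregate reduction (alternative decomposition, same O(n) cost).


-- ===== PORT A =====
-- the 'line' loop: first-coordinate check with early return False (board0 = board[0])
def check_border_loopL (board0 : Int) (direction : Int) : List (Int × Int) → Bool
  | [] => true
  | p :: rest =>
      if p.1 + direction > board0 ∨ p.1 + direction < 1 then false
      else check_border_loopL board0 direction rest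

-- the 'column' loop: second-coordinate check with early return False (board1 = board[1])
def check_border_loopC (board1 : Int) (direction : Int) : List (Int × Int) → Bool
  | [] => true
  | p :: rest =>
      if p.2 + direction > board1 ∨ p.2 + direction < 1 then false
      else check_border_loopC board1 direction rest

-- board[0]/board[1] are only read by Python when the loop runs; Pre_ guarantees they exist
-- whenever vessel_position ≠ [], so the .getD 0 default is never the value used.
def check_border (type_axis : String) (vessel_position : List (Int × Int)) (board : List Int) (direction : Int) : Bool :=
  if type_axis = "line" then
    check_border_loopL ((PySem.List.pyGet? board 0).getD 0) direction vessel_position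
  else
    check_border_loopC ((PySem.List.pyGet? board 1).getD 0) direction vessel_position

-- ===== PORT B =====
def check_border_alt (type_axis : String) (vessel_position : List (Int × Int)) (board : List Int) (direction : Int) : Bool :=
  let idx : Int := if type_axis = "line" then 0 else 1
  let coords := vessel_position.map (fun p => if idx = 0 then p.1 else p.2)
  if coords.isEmpty then true
  else
    decide (1 ≤ (PySem.List.min? coords (fun x => x)).getD 0 + direction) &&
    decide ((PySem.List.max? coords (fun x => x)).getD 0 + direction ≤ (PySem.List.pyGet? board idx).getD 0)

-- ===== PRECONDITION & SPEC =====
-- Pre_ excludes exactly the inputs where Python raises IndexError: a nonempty vessel list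
-- with a board missing the consulted index (board[0] for 'line', board[1] otherwise).
def Pre_check_border (type_axis : String) (vessel_position : List (Int × Int)) (board : List Int) (direction : Int) : Prop :=
  vessel_position = [] ∨ (if type_axis = "line" then 1 ≤ board.length else 2 ≤ board.length)
instance (type_axis : String) (vessel_position : List (Int × Int)) (board : List Int) (direction : Int) : Decidable (Pre_check_border type_axis vessel_position board direction) := by unfold Pre_check_border; infer_instance
def pvWitness_check_border : String × (List (Int × Int)) × List Int × Int := ("line", [(1, 2), (3, 4)], [5, 5], 1)

def Spec_check_border (type_axis : String) (vessel_position : List (Int × Int)) (board : List Int) (direction : Int) (out : Bool) : Prop := out = check_border_alt type_axis vessel_position board direction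
instance (type_axis : String) (vessel_position : List (Int × Int)) (board : List Int) (direction : Int) (out : Bool) : Decidable (Spec_check_border type_axis vessel_position board direction out) := by unfold Spec_check_border; infer_instance

-- ===== CLAIM (what is proved, stated in full; the proofs are below) =====
def Claim_equal_check_border : Prop := ∀ (type_axis : String) (vessel_position : List (Int × Int)) (board : List Int) (direction : Int), Dom_check_border type_axis vessel_position board direction → Pre_check_border type_axis vessel_position board direction → Spec_check_border type_axis vessel_position board direction (check_border type_axis vessel_position board direction)

-- ===== LEMMAS AND PROOFS =====

-- A's loop returns true iff every selected coordinate stays in [1, bound] after the move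
theorem loopL_iff (b d : Int) (l : List (Int × Int)) :
    check_border_loopL b d l = true ↔ ∀ p ∈ l, 1 ≤ p.1 + d ∧ p.1 + d ≤ b := by
  induction l with
  | nil => simp [check_border_loopL]
  | cons p t ih =>
      simp only [check_border_loopL, List.mem_cons]
      split_ifs with h
      · constructor
        · intro hf; exact absurd hf (by simp)
        · intro hall
          have := hall p (Or.inl rfl); omega
      · simp only [ih]
        constructor
        · intro hall q hq
          rcases hq with rfl | hq
          · omega
          · exact hall q hq
        · intro hall q hq; exact hall q (Or.inr hq)

theorem loopC_iff (b d : Int) (l : List (Int × Int)) :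
    check_border_loopC b d l = true ↔ ∀ p ∈ l, 1 ≤ p.2 + d ∧ p.2 + d ≤ b := by
  induction l with
  | nil => simp [check_border_loopC]
  | cons p t ih =>
      simp only [check_border_loopC, List.mem_cons]
      split_ifs with h
      · constructor
        · intro hf; exact absurd hf (by simp)
        · intro hall
          have := hall p (Or.inl rfl); omega
      · simp only [ih]
        constructor
        · intro hall q hq
          rcases hq with rfl | hq
          · omega
          · exact hall q hq
        · intro hall q hq; exact hall q (Or.inr hq)

-- B's min/max condition on a nonempty coordinate list says exactly 'all in range'
theorem minmax_iff (c : Int) (t : List Int) (b d : Int) :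
    (1 ≤ (PySem.List.min? (c :: t) (fun x => x)).getD 0 + d ∧
     (PySem.List.max? (c :: t) (fun x => x)).getD 0 + d ≤ b) ↔
    ∀ x ∈ c :: t, 1 ≤ x + d ∧ x + d ≤ b := by
  rw [PySem.List.min?_id_cons, PySem.List.max?_id_cons]
  simp only [Option.getD_some]
  constructor
  · rintro ⟨h1, h2⟩ x hx
    rcases List.mem_cons.mp hx with rfl | hx
    · have hmn := (PySem.List.foldl_min_le t x).1
      have hmx := (PySem.List.le_foldl_max t x).1
      omega
    · have hmn := (PySem.List.foldl_min_le t c).2 x hx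
      have hmx := (PySem.List.le_foldl_max t c).2 x hx
      omega
  · intro hall
    constructor
    · rcases PySem.List.foldl_min_mem t c with h | h
      · rw [h]; exact (hall c (List.mem_cons_self ..)).1
      · exact (hall _ (List.mem_cons_of_mem _ h)).1
    · rcases PySem.List.foldl_max_mem t c with h | h
      · rw [h]; exact (hall c (List.mem_cons_self ..)).2
      · exact (hall _ (List.mem_cons_of_mem _ h)).2

theorem side_eq (sel : Int × Int → Int) (b d : Int) (l : List (Int × Int))
    (loop : List (Int × Int) → Bool)
    (hloop : loop l = true ↔ ∀ p ∈ l, 1 ≤ sel p + d ∧ sel p + d ≤ b) :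
    loop l =
      (if (l.map sel).isEmpty then true
       else decide (1 ≤ (PySem.List.min? (l.map sel) (fun x => x)).getD 0 + d) &&
            decide ((PySem.List.max? (l.map sel) (fun x => x)).getD 0 + d ≤ b)) := by
  cases l with
  | nil => simp [hloop.mpr (by simp)]
  | cons p t =>
      simp only [List.map_cons, List.isEmpty_cons, if_neg Bool.false_ne_true]
      rw [← Bool.coe_iff_coe]
      simp only [Bool.and_eq_true, decide_eq_true_eq, hloop]
      rw [show (1 ≤ (PySem.List.min? (sel p :: t.map sel) fun x => x).getD 0 + d) ∧
            ((PySem.List.max? (sel p :: t.map sel) fun x => x).getD 0 + d ≤ b) ↔ _ from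
          minmax_iff (sel p) (t.map sel) b d]
      constructor
      · intro hall x hx
        rcases List.mem_cons.mp hx with rfl | hx
        · exact hall p (List.mem_cons_self ..)
        · obtain ⟨q, hq, rfl⟩ := List.mem_map.mp hx
          exact hall q (List.mem_cons_of_mem _ hq)
      · intro hall q hq
        rcases List.mem_cons.mp hq with rfl | hq
        · exact hall (sel q) (List.mem_cons_self ..)
        · exact hall (sel q) (List.mem_cons_of_mem _ (List.mem_map_of_mem hq))

-- ===== VERDICT (by name: the statement is the Claim_ definition above) =====
theorem check_border_spec : Claim_equal_check_border := by
  intro type_axis vessel_position board direction _ _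
  unfold Spec_check_border check_border check_border_alt
  by_cases h : type_axis = "line"
  · simp only [h, if_pos rfl]
    exact side_eq (fun p => p.1) _ direction vessel_position _
      (loopL_iff ((PySem.List.pyGet? board 0).getD 0) direction vessel_position)
  · simp only [if_neg h]
    have h1 : ((1 : Int) = 0) = False := by simp
    simp only [h1, if_false]
    exact side_eq (fun p => p.2) _ direction vessel_position _
      (loopC_iff ((PySem.List.pyGet? board 1).getD 0) direction vessel_position)
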